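-- pv_equiv track=rewrite | github.com/Jeong-Minkyeong/moomin-algorithm | 프로그래머스/1/131128. 숫자 짝꿍/숫자 짝꿍.py | solution
-- ===== SOURCE A (Python) =====
-- def solution(X, Y):
--     answer = ''
--     X_count = [0 for i in range(10)]
--     Y_count = [0 for i in range(10)]
--
--     for i in X:
--         X_count[int(i)] += 1
--
--     for i in Y:
--         Y_count[int(i)] += 1
--
--     for i in range(9, -1, -1):
--         if X_count[i] >= 1 and Y_count[i] >= 1:
--             answer += str(i)*min(Y_count[i], X_count[i])
--
--     if len(answer) == 0:
--         return "-1"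
--     if answer[0] == "0":
--         return "0"
--     else:
--         return answer
-- ===== SOURCE B (Python) =====
-- def solution(X, Y):
--     xs = sorted(map(int, X), reverse=True)
--     ys = sorted(map(int, Y), reverse=True)
--     i = 0
--     j = 0
--     out = []
--     while i < len(xs) and j < len(ys):
--         if xs[i] == ys[j]:
--             out.append(xs[i])
--             i += 1
--             j += 1
--         elif xs[i] > ys[j]:
--             i += 1
--         else:
--             j += 1
--     if not out:
--         return "-1"
--     if out[0] == 0:
--         return "0"
--     return "".join(map(str, out))
-- ===== Notes on version B (the rewrite author's own statement) =====
-- stated objective: alternative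
-- what changed: A builds two 10-slot digit-count arrays via int() on each character and loops digits 9..0 emitting min-count repeats; B never counts: it sorts both strings' characters descending and two-pointer merges them, the equal-character hits being exactly the common multiset already in descending order, then applies the same empty->-1 / leading-0->0 packaging.
import Mathlib
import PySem

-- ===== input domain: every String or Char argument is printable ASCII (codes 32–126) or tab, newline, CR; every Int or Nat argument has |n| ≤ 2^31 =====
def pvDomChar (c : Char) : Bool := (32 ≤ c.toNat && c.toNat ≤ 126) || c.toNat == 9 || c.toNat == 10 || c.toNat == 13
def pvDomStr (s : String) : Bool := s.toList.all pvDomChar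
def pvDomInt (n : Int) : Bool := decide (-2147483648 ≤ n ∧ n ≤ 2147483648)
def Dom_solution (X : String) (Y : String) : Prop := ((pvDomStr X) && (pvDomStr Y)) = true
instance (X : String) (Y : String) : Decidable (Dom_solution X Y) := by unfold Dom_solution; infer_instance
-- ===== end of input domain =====

-- B replaces A's digit-count arrays by a descending sort of both strings followed by a
-- two-pointer merge of equal characters (alternative algorithm, similar cost).

-- ===== PORT A =====
-- answer/X/Y strings are modeled as List Char (PySem convention); int(i) on a one-character
-- string is pvDigitVal (shared by both ports), PySem.Int.ofStr? whose none case (ValueError)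
-- is excluded by Pre_solution.
def pvDigitVal (c : Char) : Int := (PySem.Int.ofStr? (String.ofList [c])).getD 0

def pvCountStep (cnt : List Int) (c : Char) : List Int :=
  PySem.List.pySetD cnt (pvDigitVal c) (PySem.List.pyGetD cnt (pvDigitVal c) 0 + 1)

def solution (X : String) (Y : String) : String :=
  let Xc := X.toList.foldl pvCountStep (List.replicate 10 (0 : Int))
  let Yc := Y.toList.foldl pvCountStep (List.replicate 10 (0 : Int))
  let answer := (PySem.List.pyRange 9 (-1) (-1)).foldl (fun ans i =>
      if PySem.List.pyGetD Xc i 0 ≥ 1 ∧ PySem.List.pyGetD Yc i 0 ≥ 1 then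
        ans ++ PySem.List.pyRepeat (PySem.Int.toStr i).toList
                 (min (PySem.List.pyGetD Yc i 0) (PySem.List.pyGetD Xc i 0))
      else ans) ([] : List Char)
  if answer.length = 0 then "-1"
  else if PySem.List.pyGet? answer 0 = some '0' then "0"
  else String.ofList answer

-- ===== PORT B =====
-- the while-loop with two indices of Source B, as the obvious structural recursion on the two lists
def pvMerge : List Int → List Int → List Int
  | [], _ => []
  | _ :: _, [] => []
  | a :: as, b :: bs =>
    if a = b then a :: pvMerge as bs
    else if b < a then pvMerge as (b :: bs)
    else pvMerge (a :: as) bs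
termination_by xs ys => xs.length + ys.length
decreasing_by all_goals (simp; try omega)

-- map(int, X) reuses pvDigitVal (the same int(i) primitive as port A); "".join(map(str, out))
-- is the concatenation of the decimal strings, on the char-list level
def solution_alt (X : String) (Y : String) : String :=
  let xs := PySem.List.sorted (X.toList.map pvDigitVal) (fun n => n) true
  let ys := PySem.List.sorted (Y.toList.map pvDigitVal) (fun n => n) true
  match pvMerge xs ys with
  | [] => "-1"
  | n :: rest => if n = 0 then "0"
      else String.ofList ((n :: rest).flatMap (fun m => (PySem.Int.toStr m).toList))

-- ===== PRECONDITION & SPEC =====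
-- Pre_ excludes exactly the inputs on which A raises ValueError: a character that is not a digit.
def Pre_solution (X : String) (Y : String) : Prop :=
  ((X.toList ++ Y.toList).all
    (fun c => (['0','1','2','3','4','5','6','7','8','9'] : List Char).contains c)) = true
instance (X : String) (Y : String) : Decidable (Pre_solution X Y) := by
  unfold Pre_solution; infer_instance
def pvWitness_solution : String × String := ("123", "321")

def Spec_solution (X : String) (Y : String) (out : String) : Prop := out = solution_alt X Y
instance (X : String) (Y : String) (out : String) : Decidable (Spec_solution X Y out) := by
  unfold Spec_solution; infer_instance

-- ===== CLAIM (what is proved, stated in full; the proofs are below) =====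
def Claim_equal_solution : Prop :=
  ∀ (X : String) (Y : String), Dom_solution X Y → Pre_solution X Y →
    Spec_solution X Y (solution X Y)

-- ===== LEMMAS AND PROOFS =====

theorem pvPre_iff (X Y : String) : Pre_solution X Y ↔
    ∀ c ∈ X.toList ++ Y.toList, c ∈ ['0','1','2','3','4','5','6','7','8','9'] := by
  simp [Pre_solution]
  aesop

-- the common digit multiset, written out in descending order
def pvDigitsD : List Char := ['9','8','7','6','5','4','3','2','1','0']

def pvCanon (X : String) (Y : String) : List Char :=
  pvDigitsD.flatMap (fun c => List.replicate (min (X.toList.count c) (Y.toList.count c)) c)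

theorem pvMem_digits_iff (c : Char) :
    c ∈ pvDigitsD ↔ c ∈ ['0','1','2','3','4','5','6','7','8','9'] := by
  simp [pvDigitsD]
  tauto

theorem pvFlat_sorted {α : Type} [LinearOrder α] (ds : List α) (hd : ds.Pairwise (fun a b => b < a)) (n : α → Nat) :
    (ds.flatMap fun c => List.replicate (n c) c).Pairwise (fun a b => b ≤ a) := by
  induction ds with
  | nil => simp
  | cons d ds ih =>
    rcases List.pairwise_cons.mp hd with ⟨hda, hd'⟩
    rw [List.flatMap_cons]
    refine List.pairwise_append.mpr ⟨?_, ih hd', ?_⟩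
    · exact List.pairwise_replicate.mpr (Or.inr le_rfl)
    · intro a ha b hb
      rcases List.mem_flatMap.mp hb with ⟨e, he, hbe⟩
      rw [List.eq_of_mem_replicate ha, List.eq_of_mem_replicate hbe]
      exact le_of_lt (hda e he)

theorem pvFlat_count {α : Type} [DecidableEq α] (ds : List α) (hnd : ds.Nodup) (n : α → Nat) (c : α) :
    (ds.flatMap fun d => List.replicate (n d) d).count c = if c ∈ ds then n c else 0 := by
  induction ds with
  | nil => simp
  | cons d ds ih =>
    rcases List.nodup_cons.mp hnd with ⟨hdm, hnd'⟩
    rw [List.flatMap_cons, List.count_append, ih hnd', List.count_replicate]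
    by_cases hcd : c = d
    · subst hcd
      simp [hdm]
    · simp [hcd, Ne.symm hcd]

theorem pvMerge_mem_left {xs ys : List Int} {c : Int} (h : c ∈ pvMerge xs ys) : c ∈ xs := by
  induction xs, ys using pvMerge.induct with
  | case1 x => simp [pvMerge] at h
  | case2 hd tl => simp [pvMerge] at h
  | case3 as b bs ih =>
    rw [pvMerge, if_pos rfl] at h
    rcases List.mem_cons.mp h with h | h
    · simp [h]
    · exact List.mem_cons_of_mem _ (ih h)
  | case4 a as b bs hne hlt ih =>
    rw [pvMerge, if_neg hne, if_pos hlt] at h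
    exact List.mem_cons_of_mem _ (ih h)
  | case5 a as b bs hne hlt ih =>
    rw [pvMerge, if_neg hne, if_neg hlt] at h
    exact ih h

theorem pvMerge_sorted {xs ys : List Int}
    (hx : xs.Pairwise (fun a b => b ≤ a)) (hy : ys.Pairwise (fun a b => b ≤ a)) :
    (pvMerge xs ys).Pairwise (fun a b => b ≤ a) := by
  induction xs, ys using pvMerge.induct with
  | case1 x => simp [pvMerge]
  | case2 hd tl => simp [pvMerge]
  | case3 as b bs ih =>
    rw [pvMerge, if_pos rfl]
    exact List.pairwise_cons.mpr
      ⟨fun c hc => (List.pairwise_cons.mp hx).1 c (pvMerge_mem_left hc),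
       ih (List.pairwise_cons.mp hx).2 (List.pairwise_cons.mp hy).2⟩
  | case4 a as b bs hne hlt ih =>
    rw [pvMerge, if_neg hne, if_pos hlt]
    exact ih (List.pairwise_cons.mp hx).2 hy
  | case5 a as b bs hne hlt ih =>
    rw [pvMerge, if_neg hne, if_neg hlt]
    exact ih hx (List.pairwise_cons.mp hy).2

theorem pvMerge_count {xs ys : List Int}
    (hx : xs.Pairwise (fun a b => b ≤ a)) (hy : ys.Pairwise (fun a b => b ≤ a)) (c : Int) :
    (pvMerge xs ys).count c = min (xs.count c) (ys.count c) := by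
  induction xs, ys using pvMerge.induct with
  | case1 x => simp [pvMerge]
  | case2 hd tl => simp [pvMerge]
  | case3 as b bs ih =>
    rw [pvMerge, if_pos rfl]
    have hrec := ih (List.pairwise_cons.mp hx).2 (List.pairwise_cons.mp hy).2
    simp [List.count_cons, hrec]
  | case4 a as b bs hne hlt ih =>
    rw [pvMerge, if_neg hne, if_pos hlt]
    have hrec := ih (List.pairwise_cons.mp hx).2 hy
    by_cases hca : c = a
    · subst hca
      have h0 : (b :: bs).count c = 0 := by
        refine List.count_eq_zero.mpr fun hm => ?_
        rcases List.mem_cons.mp hm with h | h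
        · exact hne h
        · exact absurd ((List.pairwise_cons.mp hy).1 c h) (not_le.mpr hlt)
      rw [hrec, h0]
      simp
    · rw [hrec, List.count_cons_of_ne (Ne.symm hca)]
  | case5 a as b bs hne hlt ih =>
    rw [pvMerge, if_neg hne, if_neg hlt]
    have hrec := ih hx (List.pairwise_cons.mp hy).2
    by_cases hcb : c = b
    · subst hcb
      have h0 : (a :: as).count c = 0 := by
        refine List.count_eq_zero.mpr fun hm => ?_
        rcases List.mem_cons.mp hm with h | h
        · exact hne h.symm
        · have hba : a < c := lt_of_le_of_ne (not_lt.mp hlt) (fun e => hne e)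
          exact absurd ((List.pairwise_cons.mp hx).1 c h) (not_le.mpr hba)
      rw [hrec, h0]
      simp
    · rw [hrec, List.count_cons_of_ne (Ne.symm hcb)]

-- ===== A side =====
def pvD2N (c : Char) : Nat := c.toNat - 48
def pvBump (cnt : List Int) (c : Char) : List Int :=
  cnt.set (pvD2N c) (cnt.getD (pvD2N c) 0 + 1)

theorem pvDigitVal_eq : ∀ c ∈ (['0','1','2','3','4','5','6','7','8','9'] : List Char),
    pvDigitVal c = ((pvD2N c : Nat) : Int) ∧ pvD2N c < 10 := by
  intro c hc
  simp only [List.mem_cons, List.not_mem_nil, or_false] at hc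
  rcases hc with rfl | rfl | rfl | rfl | rfl | rfl | rfl | rfl | rfl | rfl <;>
    exact ⟨by rfl, by decide⟩

theorem pvD2N_inj : ∀ c ∈ (['0','1','2','3','4','5','6','7','8','9'] : List Char),
    ∀ d ∈ (['0','1','2','3','4','5','6','7','8','9'] : List Char),
    pvD2N c = pvD2N d → c = d := by
  intro c hc d hd
  simp only [List.mem_cons, List.not_mem_nil, or_false] at hc hd
  rcases hc with rfl | rfl | rfl | rfl | rfl | rfl | rfl | rfl | rfl | rfl <;>
    rcases hd with rfl | rfl | rfl | rfl | rfl | rfl | rfl | rfl | rfl | rfl <;>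
      decide

theorem pvCountStep_eq {c : Char} (hc : c ∈ (['0','1','2','3','4','5','6','7','8','9'] : List Char))
    (cnt : List Int) : pvCountStep cnt c = pvBump cnt c := by
  rw [pvCountStep, (pvDigitVal_eq c hc).1, PySem.List.pySetD_natCast, PySem.List.pyGetD_natCast,
      pvBump]

theorem pvFold_bump (cs : List Char)
    (hcs : ∀ c ∈ cs, c ∈ (['0','1','2','3','4','5','6','7','8','9'] : List Char))
    (cnt : List Int) (hlen : cnt.length = 10)
    (d : Char) (hd : d ∈ (['0','1','2','3','4','5','6','7','8','9'] : List Char)) :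
    (cs.foldl pvBump cnt).getD (pvD2N d) 0 = cnt.getD (pvD2N d) 0 + cs.count d := by
  induction cs generalizing cnt with
  | nil => simp
  | cons c cs ih =>
    have hc := hcs c (List.mem_cons_self ..)
    have hlt : pvD2N c < cnt.length := by rw [hlen]; exact (pvDigitVal_eq c hc).2
    have hstep : (pvBump cnt c).getD (pvD2N d) 0
        = cnt.getD (pvD2N d) 0 + if c = d then 1 else 0 := by
      rw [pvBump]
      by_cases hcd : c = d
      · subst hcd
        simp [List.getD_eq_getElem?_getD, hlt]
      · have hnn : pvD2N c ≠ pvD2N d := fun e => hcd (pvD2N_inj c hc d hd e)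
        simp [List.getD_eq_getElem?_getD, hnn, hcd]
    rw [List.foldl_cons, ih (fun e he => hcs e (List.mem_cons_of_mem _ he)) _
        (by rw [pvBump, List.length_set, hlen]), hstep, List.count_cons]
    by_cases hcd : c = d
    · subst hcd
      simp
      omega
    · simp [hcd]

theorem pvCount_arr (s : String)
    (hs : ∀ c ∈ s.toList, c ∈ (['0','1','2','3','4','5','6','7','8','9'] : List Char))
    (d : Char) (hd : d ∈ (['0','1','2','3','4','5','6','7','8','9'] : List Char)) :
    (s.toList.foldl pvCountStep (List.replicate 10 (0 : Int))).getD (pvD2N d) 0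
      = (s.toList.count d : Int) := by
  rw [PySem.List.foldl_congr_mem s.toList pvCountStep pvBump (List.replicate 10 (0 : Int))
        (fun acc c hcm => pvCountStep_eq (hs c hcm) acc),
      pvFold_bump s.toList hs _ (by simp) d hd]
  have h0 : (List.replicate 10 (0 : Int)).getD (pvD2N d) 0 = 0 := by
    rw [List.getD_eq_getElem?_getD, List.getElem?_replicate]
    split <;> rfl
  rw [h0, zero_add]

theorem pvRange_digits :
    PySem.List.pyRange 9 (-1) (-1) = pvDigitsD.map (fun d => ((pvD2N d : Nat) : Int)) := by rfl

theorem pvToStr_digit : ∀ d ∈ pvDigitsD,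
    (PySem.Int.toStr ((pvD2N d : Nat) : Int)).toList = [d] := by
  intro d hd
  simp only [pvDigitsD, List.mem_cons, List.not_mem_nil, or_false] at hd
  rcases hd with rfl | rfl | rfl | rfl | rfl | rfl | rfl | rfl | rfl | rfl <;> rfl

-- A's answer list IS pvCanon
theorem pvA_core (X Y : String)
    (h : ∀ c ∈ X.toList ++ Y.toList, c ∈ (['0','1','2','3','4','5','6','7','8','9'] : List Char)) :
    (PySem.List.pyRange 9 (-1) (-1)).foldl (fun ans i =>
      if PySem.List.pyGetD (X.toList.foldl pvCountStep (List.replicate 10 (0 : Int))) i 0 ≥ 1 ∧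
         PySem.List.pyGetD (Y.toList.foldl pvCountStep (List.replicate 10 (0 : Int))) i 0 ≥ 1 then
        ans ++ PySem.List.pyRepeat (PySem.Int.toStr i).toList
                 (min (PySem.List.pyGetD (Y.toList.foldl pvCountStep (List.replicate 10 (0 : Int))) i 0)
                      (PySem.List.pyGetD (X.toList.foldl pvCountStep (List.replicate 10 (0 : Int))) i 0))
      else ans) ([] : List Char) = pvCanon X Y := by
  have hX : ∀ c ∈ X.toList, c ∈ (['0','1','2','3','4','5','6','7','8','9'] : List Char) :=
    fun c hc => h c (List.mem_append_left _ hc)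
  have hY : ∀ c ∈ Y.toList, c ∈ (['0','1','2','3','4','5','6','7','8','9'] : List Char) :=
    fun c hc => h c (List.mem_append_right _ hc)
  rw [pvRange_digits, List.foldl_map]
  rw [PySem.List.foldl_congr_mem pvDigitsD _ (fun ans d =>
      ans ++ List.replicate (min (X.toList.count d) (Y.toList.count d)) d) [] ?_]
  · exact (PySem.List.foldl_append_eq_flatMap _ _ _).trans (by rw [List.nil_append]; rfl)
  · intro ans d hdm
    show _ = ans ++ List.replicate (min (X.toList.count d) (Y.toList.count d)) d
    have hd : d ∈ (['0','1','2','3','4','5','6','7','8','9'] : List Char) :=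
      (pvMem_digits_iff d).mp hdm
    have hgx : PySem.List.pyGetD (X.toList.foldl pvCountStep (List.replicate 10 (0 : Int)))
        ((pvD2N d : Nat) : Int) 0 = (X.toList.count d : Int) := by
      rw [PySem.List.pyGetD_natCast, pvCount_arr X hX d hd]
    have hgy : PySem.List.pyGetD (Y.toList.foldl pvCountStep (List.replicate 10 (0 : Int)))
        ((pvD2N d : Nat) : Int) 0 = (Y.toList.count d : Int) := by
      rw [PySem.List.pyGetD_natCast, pvCount_arr Y hY d hd]
    rw [hgx, hgy, pvToStr_digit d hdm, PySem.List.pyRepeat_singleton]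
    by_cases hpos : 1 ≤ X.toList.count d ∧ 1 ≤ Y.toList.count d
    · rw [if_pos (by have h1 := hpos.1; have h2 := hpos.2; omega)]
      congr 1
      congr 1
      omega
    · rw [if_neg (by omega), show min (X.toList.count d) (Y.toList.count d) = 0 by omega,
          List.replicate_zero, List.append_nil]

-- ===== B side =====
def pvChr (k : Int) : Char := Char.ofNat (48 + k.toNat)
def pvDigitsI : List Int := [9,8,7,6,5,4,3,2,1,0]

def pvCanonI (X : String) (Y : String) : List Int :=
  pvDigitsI.flatMap (fun k =>
    List.replicate (min (X.toList.count (pvChr k)) (Y.toList.count (pvChr k))) k)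

theorem pvChr_d2n : ∀ c ∈ pvDigitsD,
    pvChr ((pvD2N c : Nat) : Int) = c ∧ ((pvD2N c : Nat) : Int) ∈ pvDigitsI := by
  intro c hc
  simp only [pvDigitsD, List.mem_cons, List.not_mem_nil, or_false] at hc
  rcases hc with rfl | rfl | rfl | rfl | rfl | rfl | rfl | rfl | rfl | rfl <;>
    exact ⟨by rfl, by decide⟩

theorem pvD2n_chr : ∀ k ∈ pvDigitsI,
    pvChr k ∈ pvDigitsD ∧ ((pvD2N (pvChr k) : Nat) : Int) = k := by
  intro k hk
  simp only [pvDigitsI, List.mem_cons, List.not_mem_nil, or_false] at hk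
  rcases hk with rfl | rfl | rfl | rfl | rfl | rfl | rfl | rfl | rfl | rfl <;>
    exact ⟨by decide, by rfl⟩

theorem pvD2n_zero_iff : ∀ c ∈ pvDigitsD, (((pvD2N c : Nat) : Int) = 0 ↔ c = '0') := by
  intro c hc
  simp only [pvDigitsD, List.mem_cons, List.not_mem_nil, or_false] at hc
  rcases hc with rfl | rfl | rfl | rfl | rfl | rfl | rfl | rfl | rfl | rfl <;> decide

theorem pvMapCount (l : List Char)
    (hl : ∀ c ∈ l, c ∈ (['0','1','2','3','4','5','6','7','8','9'] : List Char))
    (d : Char) (hd : d ∈ (['0','1','2','3','4','5','6','7','8','9'] : List Char)) :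
    (l.map pvDigitVal).count ((pvD2N d : Nat) : Int) = l.count d := by
  induction l with
  | nil => simp
  | cons c cs ih =>
    have hc := hl c (List.mem_cons_self ..)
    have ih' := ih (fun e he => hl e (List.mem_cons_of_mem _ he))
    rw [List.map_cons, List.count_cons, List.count_cons, ih', (pvDigitVal_eq c hc).1]
    by_cases hcd : c = d
    · subst hcd
      simp
    · have h1 : ((pvD2N d : Nat) : Int) ≠ ((pvD2N c : Nat) : Int) := fun e =>
        hcd (pvD2N_inj c hc d hd (by exact_mod_cast e.symm))
      simp [hcd, h1.symm]

theorem pvMapCount_zero (l : List Char)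
    (hl : ∀ c ∈ l, c ∈ (['0','1','2','3','4','5','6','7','8','9'] : List Char))
    (k : Int) (hk : k ∉ pvDigitsI) : (l.map pvDigitVal).count k = 0 := by
  refine List.count_eq_zero.mpr fun hm => ?_
  rcases List.mem_map.mp hm with ⟨c, hc, hck⟩
  have hcd : c ∈ pvDigitsD := (pvMem_digits_iff c).mpr (hl c hc)
  rw [(pvDigitVal_eq c (hl c hc)).1] at hck
  exact hk (hck ▸ (pvChr_d2n c hcd).2)

theorem pvCanonI_sorted (X Y : String) :
    (pvCanonI X Y).Pairwise (fun a b => b ≤ a) :=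
  pvFlat_sorted pvDigitsI (by decide) _

theorem pvCanonI_count (X Y : String) (k : Int) :
    (pvCanonI X Y).count k =
      if k ∈ pvDigitsI then min (X.toList.count (pvChr k)) (Y.toList.count (pvChr k)) else 0 :=
  pvFlat_count pvDigitsI (by decide) _ k

-- B's merged list IS pvCanonI
theorem pvAlt_core (X Y : String)
    (h : ∀ c ∈ X.toList ++ Y.toList, c ∈ (['0','1','2','3','4','5','6','7','8','9'] : List Char)) :
    pvMerge (PySem.List.sorted (X.toList.map pvDigitVal) (fun n => n) true)
            (PySem.List.sorted (Y.toList.map pvDigitVal) (fun n => n) true) = pvCanonI X Y := by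
  have hX : ∀ c ∈ X.toList, c ∈ (['0','1','2','3','4','5','6','7','8','9'] : List Char) :=
    fun c hc => h c (List.mem_append_left _ hc)
  have hY : ∀ c ∈ Y.toList, c ∈ (['0','1','2','3','4','5','6','7','8','9'] : List Char) :=
    fun c hc => h c (List.mem_append_right _ hc)
  have hsx : (PySem.List.sorted (X.toList.map pvDigitVal) (fun n => n) true).Pairwise
      (fun a b => b ≤ a) := by
    simpa using PySem.List.sorted_pairwise_rev (X.toList.map pvDigitVal) (fun n : Int => n)
  have hsy : (PySem.List.sorted (Y.toList.map pvDigitVal) (fun n => n) true).Pairwise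
      (fun a b => b ≤ a) := by
    simpa using PySem.List.sorted_pairwise_rev (Y.toList.map pvDigitVal) (fun n : Int => n)
  have hperm : (pvMerge (PySem.List.sorted (X.toList.map pvDigitVal) (fun n => n) true)
      (PySem.List.sorted (Y.toList.map pvDigitVal) (fun n => n) true)).Perm (pvCanonI X Y) := by
    refine List.perm_iff_count.mpr fun k => ?_
    rw [pvMerge_count hsx hsy,
        (PySem.List.sorted_perm (xs := X.toList.map pvDigitVal) (key := fun n : Int => n)
          (rev := true)).count_eq,
        (PySem.List.sorted_perm (xs := Y.toList.map pvDigitVal) (key := fun n : Int => n)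
          (rev := true)).count_eq,
        pvCanonI_count]
    by_cases hk : k ∈ pvDigitsI
    · rcases pvD2n_chr k hk with ⟨hkd, hke⟩
      have hkc : pvChr k ∈ (['0','1','2','3','4','5','6','7','8','9'] : List Char) :=
        (pvMem_digits_iff _).mp hkd
      have e1 : (X.toList.map pvDigitVal).count k = X.toList.count (pvChr k) := by
        conv_lhs => rw [← hke]
        exact pvMapCount X.toList hX (pvChr k) hkc
      have e2 : (Y.toList.map pvDigitVal).count k = Y.toList.count (pvChr k) := by
        conv_lhs => rw [← hke]
        exact pvMapCount Y.toList hY (pvChr k) hkc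
      rw [if_pos hk, e1, e2]
    · rw [if_neg hk, pvMapCount_zero X.toList hX k hk, pvMapCount_zero Y.toList hY k hk]
      rfl
  exact List.Perm.eq_of_pairwise (fun a b _ _ h1 h2 => le_antisymm h2 h1)
    (pvMerge_sorted hsx hsy) (pvCanonI_sorted X Y) hperm

theorem pvCanonI_eq_map (X Y : String) :
    pvCanonI X Y = (pvCanon X Y).map (fun c => ((pvD2N c : Nat) : Int)) := by
  rw [pvCanonI, pvCanon,
      show pvDigitsI = pvDigitsD.map (fun c => ((pvD2N c : Nat) : Int)) from by decide,
      List.flatMap_map, List.map_flatMap]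
  refine List.flatMap_congr fun c hc => ?_
  rw [List.map_replicate, (pvChr_d2n c hc).1]

theorem pvCanon_mem (X Y : String) : ∀ c ∈ pvCanon X Y, c ∈ pvDigitsD := by
  intro c hc
  rcases List.mem_flatMap.mp hc with ⟨d, hd, hcd⟩
  exact List.eq_of_mem_replicate hcd ▸ hd

-- the two packagings of the common multiset agree (A packages the digit characters,
-- B the digit values)
theorem pvPack_eq (l : List Char) (hm : ∀ c ∈ l, c ∈ pvDigitsD) :
    (if l.length = 0 then "-1"
     else if PySem.List.pyGet? l 0 = some '0' then "0" else String.ofList l)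
    = (match l.map (fun c => ((pvD2N c : Nat) : Int)) with
       | [] => "-1"
       | n :: rest => if n = 0 then "0"
           else String.ofList ((n :: rest).flatMap (fun m => (PySem.Int.toStr m).toList))) := by
  cases l with
  | nil => rfl
  | cons c rest =>
    have hc := hm c (List.mem_cons_self ..)
    rw [List.map_cons]
    show (if (c :: rest).length = 0 then "-1"
      else if PySem.List.pyGet? (c :: rest) 0 = some '0' then "0" else String.ofList (c :: rest))
      = if ((pvD2N c : Nat) : Int) = 0 then "0"
        else String.ofList ((((pvD2N c : Nat) : Int) :: rest.map (fun c => ((pvD2N c : Nat) : Int))).flatMap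
          (fun m => (PySem.Int.toStr m).toList))
    rw [if_neg (by simp), PySem.List.pyGet?_zero_cons]
    by_cases h0 : c = '0'
    · rw [if_pos (by rw [h0]), if_pos ((pvD2n_zero_iff c hc).mpr h0)]
    · rw [if_neg (by simpa using h0), if_neg (fun e => h0 ((pvD2n_zero_iff c hc).mp e))]
      rw [show ((pvD2N c : Nat) : Int) :: rest.map (fun c => ((pvD2N c : Nat) : Int))
            = (c :: rest).map (fun c => ((pvD2N c : Nat) : Int)) from rfl,
          List.flatMap_map,
          List.flatMap_congr (fun x hx => pvToStr_digit x (hm x hx)),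
          List.flatMap_singleton']

-- ===== VERDICT (by name: the statement is the Claim_ definition above) =====
theorem solution_spec : Claim_equal_solution := by
  intro X Y _ hpre
  have hp := (pvPre_iff X Y).mp hpre
  unfold Spec_solution
  simp only [solution, solution_alt]
  rw [pvA_core X Y hp, pvAlt_core X Y hp, pvCanonI_eq_map,
      pvPack_eq (pvCanon X Y) (pvCanon_mem X Y)]
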